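-- pv_equiv track=rewrite | github.com/zyma98/pie | backend/backend-pytorch/symphony-backend/l4m.py | get_video_position_ids
-- ===== SOURCE A (Python) =====
-- def get_video_position_ids(offset, patch_t, patch_h, patch_w, time_scale) -> list[tuple[int, int, int]]:
--     output_ids = []
--
--     for i in range(patch_t * patch_h * patch_w):
--         patch_t_i = i // (patch_h * patch_w)
--         patch_hw_i = i % (patch_h * patch_w)
--
--         output_ids.append((
--             offset + patch_t_i * time_scale,
--             offset + patch_hw_i // patch_w,
--             offset + patch_hw_i % patch_w
--         ))
--
--     return output_ids
-- ===== SOURCE B (Python) =====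
-- def get_video_position_ids(offset, patch_t, patch_h, patch_w, time_scale) -> list[tuple[int, int, int]]:
--     # A grid with a nonpositive dimension has no patches.
--     if patch_t <= 0 or patch_h <= 0 or patch_w <= 0:
--         return []
--     # Thread the (t, h, w) coordinates directly with three nested loops
--     # instead of decoding them from a flat index with // and %.
--     output_ids = []
--     for t in range(patch_t):
--         for h in range(patch_h):
--             for w in range(patch_w):
--                 output_ids.append((offset + t * time_scale, offset + h, offset + w))
--     return output_ids
-- ===== Notes on version B (the rewrite author's own statement) =====
-- stated objective: simpler
-- what changed: Replaces the flat loop over range(patch_t*patch_h*patch_w) with its // and % index decoding by three nested loops that carry the (t,h,w) coordinates directly in row-major order.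
-- intended difference: When some patch dimension is negative but the product patch_t*patch_h*patch_w is positive (e.g. two negative dimensions), A returns a non-empty list of meaningless positions decoded from the flat index, while B returns [], the intended result for a grid with a negative dimension. — e.g. on get_video_position_ids(0, -1, -1, 1, 1): A returns [(0, 0, 0)], B returns []
import Mathlib
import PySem

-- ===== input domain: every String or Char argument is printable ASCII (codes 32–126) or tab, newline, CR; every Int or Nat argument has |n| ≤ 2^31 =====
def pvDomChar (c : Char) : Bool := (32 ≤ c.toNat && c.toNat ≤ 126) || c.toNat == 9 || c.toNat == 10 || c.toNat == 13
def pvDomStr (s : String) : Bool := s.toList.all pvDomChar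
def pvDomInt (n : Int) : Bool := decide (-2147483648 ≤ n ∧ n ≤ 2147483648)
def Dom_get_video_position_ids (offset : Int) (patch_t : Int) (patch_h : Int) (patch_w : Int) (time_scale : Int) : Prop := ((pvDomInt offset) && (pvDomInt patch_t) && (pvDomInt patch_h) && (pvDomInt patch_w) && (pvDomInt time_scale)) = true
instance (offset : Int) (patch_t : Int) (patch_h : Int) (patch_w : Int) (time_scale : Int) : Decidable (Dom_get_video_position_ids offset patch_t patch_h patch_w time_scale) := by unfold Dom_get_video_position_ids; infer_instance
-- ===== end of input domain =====

-- B replaces A's flat loop with //,% index decoding by three nested loops carrying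
-- the (t,h,w) coordinates directly (objective: simpler); on grids with a negative
-- dimension whose product is positive, A returns meaningless tuples while B returns [].


-- ===== PORT A =====
def get_video_position_ids (offset : Int) (patch_t : Int) (patch_h : Int) (patch_w : Int) (time_scale : Int) : List (Int × Int × Int) :=
  (PySem.List.pyRange 0 (patch_t * patch_h * patch_w)).foldl
    (fun output_ids i =>
      let patch_t_i := PySem.Int.floordiv i (patch_h * patch_w)
      let patch_hw_i := PySem.Int.mod i (patch_h * patch_w)
      output_ids ++ [(offset + patch_t_i * time_scale,
                      offset + PySem.Int.floordiv patch_hw_i patch_w,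
                      offset + PySem.Int.mod patch_hw_i patch_w)]) []

-- ===== PORT B =====
def get_video_position_ids_alt (offset : Int) (patch_t : Int) (patch_h : Int) (patch_w : Int) (time_scale : Int) : List (Int × Int × Int) :=
  if patch_t ≤ 0 ∨ patch_h ≤ 0 ∨ patch_w ≤ 0 then [] else
  (PySem.List.pyRange 0 patch_t).foldl
    (fun output_ids t =>
      (PySem.List.pyRange 0 patch_h).foldl
        (fun output_ids h =>
          (PySem.List.pyRange 0 patch_w).foldl
            (fun output_ids w =>
              output_ids ++ [(offset + t * time_scale, offset + h, offset + w)])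
            output_ids)
        output_ids)
    []

-- ===== PRECONDITION & SPEC =====
-- When some patch dimension is negative but patch_t*patch_h*patch_w is positive, A returns a
-- non-empty list of meaningless positions decoded from the flat index, while B returns [],
-- the intended result for a grid with a negative dimension.
def D_get_video_position_ids (offset : Int) (patch_t : Int) (patch_h : Int) (patch_w : Int) (time_scale : Int) : Prop :=
  (patch_t < 0 ∨ patch_h < 0 ∨ patch_w < 0) ∧ 0 < patch_t * patch_h * patch_w
instance (offset : Int) (patch_t : Int) (patch_h : Int) (patch_w : Int) (time_scale : Int) : Decidable (D_get_video_position_ids offset patch_t patch_h patch_w time_scale) := by unfold D_get_video_position_ids; infer_instance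

def Spec_get_video_position_ids (offset : Int) (patch_t : Int) (patch_h : Int) (patch_w : Int) (time_scale : Int) (out : List (Int × Int × Int)) : Prop := ¬ D_get_video_position_ids offset patch_t patch_h patch_w time_scale → out = get_video_position_ids_alt offset patch_t patch_h patch_w time_scale
instance (offset : Int) (patch_t : Int) (patch_h : Int) (patch_w : Int) (time_scale : Int) (out : List (Int × Int × Int)) : Decidable (Spec_get_video_position_ids offset patch_t patch_h patch_w time_scale out) := by unfold Spec_get_video_position_ids; infer_instance

def pvDiffWitness_get_video_position_ids : Int × Int × Int × Int × Int := (0, -1, -1, 1, 1)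
def pvDiffWitnessOut_get_video_position_ids : (List (Int × Int × Int)) × (List (Int × Int × Int)) := ([(0, 0, 0)], [])

-- ===== CLAIM (what is proved, stated in full; the proofs are below) =====
def Claim_unchanged_get_video_position_ids : Prop := ∀ (offset : Int) (patch_t : Int) (patch_h : Int) (patch_w : Int) (time_scale : Int), Dom_get_video_position_ids offset patch_t patch_h patch_w time_scale → Spec_get_video_position_ids offset patch_t patch_h patch_w time_scale (get_video_position_ids offset patch_t patch_h patch_w time_scale)
def Claim_changed_get_video_position_ids : Prop := Dom_get_video_position_ids (pvDiffWitness_get_video_position_ids.1) (pvDiffWitness_get_video_position_ids.2.1) (pvDiffWitness_get_video_position_ids.2.2.1) (pvDiffWitness_get_video_position_ids.2.2.2.1) (pvDiffWitness_get_video_position_ids.2.2.2.2) ∧ D_get_video_position_ids (pvDiffWitness_get_video_position_ids.1) (pvDiffWitness_get_video_position_ids.2.1) (pvDiffWitness_get_video_position_ids.2.2.1) (pvDiffWitness_get_video_position_ids.2.2.2.1) (pvDiffWitness_get_video_position_ids.2.2.2.2) ∧ get_video_position_ids (pvDiffWitness_get_video_position_ids.1) (pvDiffWitness_get_video_position_ids.2.1)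 (pvDiffWitness_get_video_position_ids.2.2.1) (pvDiffWitness_get_video_position_ids.2.2.2.1) (pvDiffWitness_get_video_position_ids.2.2.2.2) = pvDiffWitnessOut_get_video_position_ids.1 ∧ get_video_position_ids_alt (pvDiffWitness_get_video_position_ids.1) (pvDiffWitness_get_video_position_ids.2.1) (pvDiffWitness_get_video_position_ids.2.2.1) (pvDiffWitness_get_video_position_ids.2.2.2.1) (pvDiffWitness_get_video_position_ids.2.2.2.2) = pvDiffWitnessOut_get_video_position_ids.2 ∧ pvDiffWitnessOut_get_video_position_ids.1 ≠ pvDiffWitnessOut_get_video_position_ids.2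
def Claim_exact_get_video_position_ids : Prop := ∀ (offset : Int) (patch_t : Int) (patch_h : Int) (patch_w : Int) (time_scale : Int), Dom_get_video_position_ids offset patch_t patch_h patch_w time_scale → D_get_video_position_ids offset patch_t patch_h patch_w time_scale → get_video_position_ids offset patch_t patch_h patch_w time_scale ≠ get_video_position_ids_alt offset patch_t patch_h patch_w time_scale

-- ===== LEMMAS AND PROOFS =====

-- pyRange with nonpositive stop is empty
theorem pyRange_zero_nonpos (n : Int) (h : n ≤ 0) : PySem.List.pyRange 0 n = [] := by
  simp [PySem.List.pyRange]; omega

-- A is the map of the index-decoding function over the flat range (all Int dims)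
theorem a_as_map (offset patch_t patch_h patch_w time_scale : Int) :
    get_video_position_ids offset patch_t patch_h patch_w time_scale
      = (PySem.List.pyRange 0 (patch_t * patch_h * patch_w)).map (fun i =>
          (offset + PySem.Int.floordiv i (patch_h * patch_w) * time_scale,
           offset + PySem.Int.floordiv (PySem.Int.mod i (patch_h * patch_w)) patch_w,
           offset + PySem.Int.mod (PySem.Int.mod i (patch_h * patch_w)) patch_w)) := by
  unfold get_video_position_ids
  exact PySem.List.foldl_append_singleton_eq_map _ _ _

-- folding 'append a singleton' over pyRange 0 n, as a map over List.range
theorem foldl_pyRange_append {α : Type} (n : Nat) (f : Int → α) (acc : List α) :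
    (PySem.List.pyRange 0 (n : Int)).foldl (fun a x => a ++ [f x]) acc
      = acc ++ (List.range n).map (fun (k : Nat) => f (k : Int)) := by
  rw [PySem.List.pyRange_zero_natCast, List.foldl_map]
  exact PySem.List.foldl_append_singleton_eq_map _ _ _

-- a fold over pyRange 0 n whose body appends G x is the flatMap of G over List.range
theorem foldl_pyRange_flatMap {α : Type} (n : Nat) (F : List α → Int → List α)
    (G : Int → List α) (hF : ∀ (acc : List α) (x : Int), F acc x = acc ++ G x) (acc : List α) :
    (PySem.List.pyRange 0 (n : Int)).foldl F acc
      = acc ++ (List.range n).flatMap (fun (k : Nat) => G (k : Int)) := by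
  rw [PySem.List.pyRange_zero_natCast, List.foldl_map]
  rw [PySem.List.foldl_congr_mem (List.range n) _ (fun a k => a ++ G (k : Int)) acc
        (fun a k _ => hF a ((k : Nat) : Int))]
  exact PySem.List.foldl_append_eq_flatMap _ _ _

-- B in flatMap normal form (nonnegative dimensions)
theorem alt_eq_flatMap (offset : Int) (t h w : Nat) (ts : Int)
    (ht : 0 < t) (hh : 0 < h) (hw : 0 < w) :
    get_video_position_ids_alt offset (t : Int) (h : Int) (w : Int) ts
      = (List.range t).flatMap (fun (ti : Nat) =>
          (List.range h).flatMap (fun (hi : Nat) =>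
            (List.range w).map (fun (wi : Nat) =>
              (offset + (ti : Int) * ts, offset + (hi : Int), offset + (wi : Int))))) := by
  unfold get_video_position_ids_alt
  rw [if_neg (by omega)]
  rw [foldl_pyRange_flatMap t _
      (fun ti => (List.range h).flatMap (fun (hi : Nat) =>
        (List.range w).map (fun (wi : Nat) => (offset + ti * ts, offset + (hi : Int), offset + (wi : Int)))))
      (fun acc ti => by
        rw [foldl_pyRange_flatMap h _
            (fun hi => (List.range w).map (fun (wi : Nat) => (offset + ti * ts, offset + hi, offset + (wi : Int))))
            (fun acc2 hi => foldl_pyRange_append w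
              (fun wi => (offset + ti * ts, offset + hi, offset + wi)) acc2) acc])
      []]
  simp

-- 2-D decode: mapping j ↦ (j / w, j % w) over range (h*w) is the nested traversal
theorem decode2 {α : Type} (h w : Nat) (g : Nat → Nat → α) :
    (List.range (h * w)).map (fun j => g (j / w) (j % w))
      = (List.range h).flatMap (fun (hi : Nat) => (List.range w).map (fun (wi : Nat) => g hi wi)) := by
  rcases Nat.eq_zero_or_pos w with hw | hw
  · subst hw; simp
  · induction h with
    | zero => simp
    | succ h ih =>
      rw [Nat.succ_mul, List.range_add, List.map_append, ih, List.range_succ,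
          List.flatMap_append]
      congr 1
      · simp only [List.flatMap_cons, List.flatMap_nil, List.append_nil, List.map_map]
        apply List.map_congr_left
        intro a ha
        simp only [List.mem_range] at ha
        have h1 : (h * w + a) / w = h := by
          rw [Nat.add_comm, Nat.mul_comm, Nat.add_mul_div_left _ _ hw, Nat.div_eq_of_lt ha]
          omega
        have h2 : (h * w + a) % w = a := by
          rw [Nat.add_comm, Nat.add_mul_mod_self_right, Nat.mod_eq_of_lt ha]
        simp [h1, h2]

-- 3-D decode
theorem decode3 {α : Type} (t h w : Nat) (f : Nat → Nat → Nat → α) :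
    (List.range (t * h * w)).map
        (fun i => f (i / (h * w)) (i % (h * w) / w) (i % (h * w) % w))
      = (List.range t).flatMap (fun (ti : Nat) =>
          (List.range h).flatMap (fun (hi : Nat) =>
            (List.range w).map (fun (wi : Nat) => f ti hi wi))) := by
  rw [Nat.mul_assoc, decode2 t (h * w) (fun ti j => f ti (j / w) (j % w))]
  apply List.flatMap_congr
  intro ti _
  exact decode2 h w (fun hi wi => f ti hi wi)

-- A = B on nonnegative dimensions
theorem eq_of_nonneg (offset : Int) (t h w : Nat) (ts : Int) :
    get_video_position_ids offset (t : Int) (h : Int) (w : Int) ts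
      = get_video_position_ids_alt offset (t : Int) (h : Int) (w : Int) ts := by
  by_cases hz : t = 0 ∨ h = 0 ∨ w = 0
  · have hprod : ((t : Int) * (h : Int) * (w : Int)) = 0 := by
      rcases hz with rfl | rfl | rfl <;> push_cast <;> ring
    have halt : get_video_position_ids_alt offset (t : Int) (h : Int) (w : Int) ts = [] := by
      unfold get_video_position_ids_alt
      rw [if_pos (by omega)]
    rw [a_as_map, hprod, pyRange_zero_nonpos 0 (le_refl 0), halt]
    rfl
  push Not at hz
  rw [a_as_map, alt_eq_flatMap offset t h w ts (by omega) (by omega) (by omega)]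
  have hc : (t : Int) * (h : Int) * (w : Int) = ((t * h * w : Nat) : Int) := by push_cast; ring
  rw [hc, PySem.List.pyRange_zero_natCast, List.map_map]
  rw [← decode3 t h w (fun ti hi wi =>
    (offset + (ti : Int) * ts, offset + (hi : Int), offset + (wi : Int)))]
  apply List.map_congr_left
  intro i _
  have hhw : (h : Int) * (w : Int) = ((h * w : Nat) : Int) := by push_cast; ring
  simp only [Function.comp, hhw, PySem.Int.floordiv_natCast, PySem.Int.mod_natCast]

-- B is empty as soon as one dimension is negative
theorem alt_eq_nil_of_neg (offset patch_t patch_h patch_w ts : Int)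
    (hneg : patch_t < 0 ∨ patch_h < 0 ∨ patch_w < 0) :
    get_video_position_ids_alt offset patch_t patch_h patch_w ts = [] := by
  unfold get_video_position_ids_alt
  rw [if_pos (by omega)]

-- ===== VERDICT (by name: the statement is the Claim_ definition above) =====
theorem get_video_position_ids_spec : Claim_unchanged_get_video_position_ids := by
  intro offset patch_t patch_h patch_w ts _ hnd
  unfold D_get_video_position_ids at hnd
  push Not at hnd
  by_cases hnn : 0 ≤ patch_t ∧ 0 ≤ patch_h ∧ 0 ≤ patch_w
  · obtain ⟨t, rfl⟩ := Int.eq_ofNat_of_zero_le hnn.1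
    obtain ⟨h, rfl⟩ := Int.eq_ofNat_of_zero_le hnn.2.1
    obtain ⟨w, rfl⟩ := Int.eq_ofNat_of_zero_le hnn.2.2
    exact eq_of_nonneg offset t h w ts
  · have hneg : patch_t < 0 ∨ patch_h < 0 ∨ patch_w < 0 := by omega
    have hprod : patch_t * patch_h * patch_w ≤ 0 := by
      by_contra hc; exact absurd (hnd hneg) (by omega)
    rw [a_as_map, pyRange_zero_nonpos _ hprod, alt_eq_nil_of_neg _ _ _ _ _ hneg]
    rfl

theorem get_video_position_ids_changed : Claim_changed_get_video_position_ids := by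
  unfold Claim_changed_get_video_position_ids; decide

theorem get_video_position_ids_tight : Claim_exact_get_video_position_ids := by
  intro offset patch_t patch_h patch_w ts _ hd
  obtain ⟨hneg, hprod⟩ := hd
  rw [a_as_map, alt_eq_nil_of_neg _ _ _ _ _ hneg,
      PySem.List.pyRange_one_cons hprod]
  simp
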